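-- pv_equiv track=rewrite | github.com/lbnmahs/quadrrl | scripts/analysis/analyze_logs.py | identify_key_metrics
-- ===== SOURCE A (Python) =====
-- from collections import defaultdict
-- from typing import Dict, List, Any
--
-- def identify_key_metrics(all_metrics: Dict[str, Dict[str, Any]]) -> List[str]:
--     """Identify the most significant metrics based on common naming patterns."""
--     key_patterns = [
--         "reward", "return", "episode",
--         "loss", "value", "policy",
--         "distance", "position", "tracking",
--         "success", "completion", "termination",
--         "fps", "time", "steps",
--     ]
--
--     key_metrics = []
--     metric_scores = defaultdict(int)
--
--     for run_name, metrics in all_metrics.items():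
--         for metric_name in metrics.get("metric_names", []):
--             metric_lower = metric_name.lower()
--             for pattern in key_patterns:
--                 if pattern in metric_lower:
--                     metric_scores[metric_name] += 1
--                     break
--
--     # Sort by frequency and return top metrics
--     sorted_metrics = sorted(metric_scores.items(), key=lambda x: x[1], reverse=True)
--     key_metrics = [name for name, _ in sorted_metrics[:20]]
--
--     return key_metrics
-- ===== SOURCE B (Python) =====
-- from typing import Dict, List, Any
--
-- def identify_key_metrics(all_metrics: Dict[str, Dict[str, Any]]) -> List[str]:
--     """Identify the most significant metrics based on common naming patterns."""
--     key_patterns = [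
--         "reward", "return", "episode",
--         "loss", "value", "policy",
--         "distance", "position", "tracking",
--         "success", "completion", "termination",
--         "fps", "time", "steps",
--     ]
--
--     scores = {}
--     for metrics in all_metrics.values():
--         for metric_name in metrics.get("metric_names", []):
--             low = metric_name.lower()
--             if any(p in low for p in key_patterns):
--                 scores[metric_name] = scores.get(metric_name, 0) + 1
--
--     # Group names by score (counting-style selection instead of a full sort):
--     # walk the distinct scores from highest to lowest and emit each score's
--     # names in first-insertion order, which reproduces the stable sort.
--     order = []
--     for s in sorted(set(scores.values()), reverse=True):
--         order.extend(name for name, c in scores.items() if c == s)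
--     return order[:20]
-- ===== Notes on version B (the rewrite author's own statement) =====
-- stated objective: alternative
-- what changed: B replaces A's full stable sort of the (name, count) pairs by a counting-style group-by-score selection: it sorts only the distinct score values descending and emits each score's names in first-insertion order, then truncates to 20.
import Mathlib
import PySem

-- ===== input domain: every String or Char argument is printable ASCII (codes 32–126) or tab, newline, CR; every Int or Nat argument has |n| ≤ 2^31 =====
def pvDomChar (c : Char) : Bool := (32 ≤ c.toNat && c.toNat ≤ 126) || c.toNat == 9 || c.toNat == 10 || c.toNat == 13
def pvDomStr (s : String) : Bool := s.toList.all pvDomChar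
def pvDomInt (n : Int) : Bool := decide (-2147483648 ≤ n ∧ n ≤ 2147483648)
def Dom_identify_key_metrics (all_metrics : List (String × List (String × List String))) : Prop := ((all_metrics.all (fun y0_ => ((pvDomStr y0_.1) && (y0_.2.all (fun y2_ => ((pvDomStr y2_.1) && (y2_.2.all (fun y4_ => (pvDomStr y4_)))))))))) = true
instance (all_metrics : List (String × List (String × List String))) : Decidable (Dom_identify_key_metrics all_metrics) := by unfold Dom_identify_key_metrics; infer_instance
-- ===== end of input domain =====

-- B replaces A's full stable sort of the (name, count) pairs by a counting-style
-- group-by-score selection (distinct scores descending, names in first-insertion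
-- order within a score); objective: alternative algorithm, same results.

-- ===== PORT A =====
def pvKeyPatternsA : List String :=
  ["reward", "return", "episode",
   "loss", "value", "policy",
   "distance", "position", "tracking",
   "success", "completion", "termination",
   "fps", "time", "steps"]

-- 'for pattern in key_patterns: if pattern in metric_lower: metric_scores[metric_name] += 1; break'
def pvPatLoopA (patterns : List String) (low : String)
    (d : PySem.Dict String Int) (name : String) : PySem.Dict String Int :=
  match patterns with
  | [] => d
  | p :: ps =>
      if PySem.Str.isIn p low then d.modify name 0 (· + 1)
      else pvPatLoopA ps low d name

def identify_key_metrics (all_metrics : List (String × List (String × List String))) : List String :=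
  let metric_scores : PySem.Dict String Int :=
    all_metrics.foldl (fun d rm =>
      ((PySem.Dict.mk rm.2).getD "metric_names" []).foldl (fun d metric_name =>
        pvPatLoopA pvKeyPatternsA (PySem.Str.lower metric_name) d metric_name) d)
      PySem.Dict.empty
  let sorted_metrics := PySem.List.sorted metric_scores.items (fun x => x.2) true
  (PySem.List.slice sorted_metrics none (some 20)).map (fun x => x.1)

-- ===== PORT B =====
def pvKeyPatternsB : List String :=
  ["reward", "return", "episode",
   "loss", "value", "policy",
   "distance", "position", "tracking",
   "success", "completion", "termination",
   "fps", "time", "steps"]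

def identify_key_metrics_alt (all_metrics : List (String × List (String × List String))) : List String :=
  let scores : PySem.Dict String Int :=
    all_metrics.foldl (fun d rm =>
      ((PySem.Dict.mk rm.2).getD "metric_names" []).foldl (fun d metric_name =>
        if pvKeyPatternsB.any (fun p => PySem.Str.isIn p (PySem.Str.lower metric_name)) then
          d.insert metric_name (d.getD metric_name 0 + 1)
        else d) d)
      PySem.Dict.empty
  let order :=
    (PySem.List.sorted (PySem.Set.ofList scores.values) (fun s => s) true).foldl
      (fun acc s => acc ++ (scores.items.filter (fun kv => kv.2 == s)).map (fun kv => kv.1)) []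
  PySem.List.slice order none (some 20)

-- ===== PRECONDITION & SPEC =====
def Spec_identify_key_metrics (all_metrics : List (String × List (String × List String))) (out : List String) : Prop := out = identify_key_metrics_alt all_metrics
instance (all_metrics : List (String × List (String × List String))) (out : List String) : Decidable (Spec_identify_key_metrics all_metrics out) := by unfold Spec_identify_key_metrics; infer_instance

-- ===== CLAIM (what is proved, stated in full; the proofs are below) =====
def Claim_equal_identify_key_metrics : Prop := ∀ (all_metrics : List (String × List (String × List String))), Dom_identify_key_metrics all_metrics → Spec_identify_key_metrics all_metrics (identify_key_metrics all_metrics)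

-- ===== LEMMAS AND PROOFS =====

-- A's pattern loop with break does the same increment as B's 'any' test.
lemma pvPatLoop_eq_any (patterns : List String) (low : String)
    (d : PySem.Dict String Int) (name : String) :
    pvPatLoopA patterns low d name
      = if patterns.any (fun p => PySem.Str.isIn p low) then
          d.insert name (d.getD name 0 + 1)
        else d := by
  induction patterns with
  | nil => simp [pvPatLoopA]
  | cons p ps ih =>
      simp only [pvPatLoopA, List.any_cons]
      rcases Bool.eq_false_or_eq_true (PySem.Str.isIn p low) with h | h
      all_goals rw [PySem.Str.isIn_eq] at h
      · simp [h, PySem.Dict.modify]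
      · simp [h, ih]

-- the two counting loops build the same dict
lemma pvScores_eq (all_metrics : List (String × List (String × List String))) :
    all_metrics.foldl (fun d rm =>
      ((PySem.Dict.mk rm.2).getD "metric_names" []).foldl (fun d metric_name =>
        pvPatLoopA pvKeyPatternsA (PySem.Str.lower metric_name) d metric_name) d)
      PySem.Dict.empty
    = all_metrics.foldl (fun d rm =>
      ((PySem.Dict.mk rm.2).getD "metric_names" []).foldl (fun d metric_name =>
        if pvKeyPatternsB.any (fun p => PySem.Str.isIn p (PySem.Str.lower metric_name)) then
          d.insert metric_name (d.getD metric_name 0 + 1)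
        else d) d)
      PySem.Dict.empty := by
  have hstep : ∀ (d : PySem.Dict String Int) (name : String),
      pvPatLoopA pvKeyPatternsA (PySem.Str.lower name) d name
        = if pvKeyPatternsB.any (fun p => PySem.Str.isIn p (PySem.Str.lower name)) then
            d.insert name (d.getD name 0 + 1)
          else d := fun d name =>
    pvPatLoop_eq_any pvKeyPatternsA (PySem.Str.lower name) d name
  have hfun : (fun (d : PySem.Dict String Int) (rm : String × List (String × List String)) =>
      ((PySem.Dict.mk rm.2).getD "metric_names" []).foldl (fun d metric_name =>
        pvPatLoopA pvKeyPatternsA (PySem.Str.lower metric_name) d metric_name) d)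
      = (fun d rm =>
      ((PySem.Dict.mk rm.2).getD "metric_names" []).foldl (fun d metric_name =>
        if pvKeyPatternsB.any (fun p => PySem.Str.isIn p (PySem.Str.lower metric_name)) then
          d.insert metric_name (d.getD metric_name 0 + 1)
        else d) d) := by
    funext d rm
    have h : (fun (d : PySem.Dict String Int) (metric_name : String) =>
        pvPatLoopA pvKeyPatternsA (PySem.Str.lower metric_name) d metric_name)
        = (fun d metric_name =>
        if pvKeyPatternsB.any (fun p => PySem.Str.isIn p (PySem.Str.lower metric_name)) then
          d.insert metric_name (d.getD metric_name 0 + 1)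
        else d) := funext fun d' => funext fun n => hstep d' n
    rw [h]
  rw [hfun]

-- inserting past a block whose elements the predicate rejects
lemma insertBy_skip_block (before : (String × Int) → (String × Int) → Bool)
    (x : String × Int) (b l : List (String × Int))
    (h : ∀ y ∈ b, before x y = false) :
    PySem.List.insertBy before x (b ++ l) = b ++ PySem.List.insertBy before x l := by
  induction b with
  | nil => simp
  | cons y ys ih =>
      have hy : before x y = false := h y (by simp)
      simp only [List.cons_append, PySem.List.insertBy, hy]
      simp only [Bool.false_eq_true, if_false]
      rw [ih (fun z hz => h z (by simp [hz]))]

-- inserting in front of a list every element of which the predicate accepts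
lemma insertBy_front (before : (String × Int) → (String × Int) → Bool)
    (x : String × Int) (l : List (String × Int))
    (h : ∀ y ∈ l, before x y = true) :
    PySem.List.insertBy before x l = x :: l := by
  cases l with
  | nil => rfl
  | cons y ys => simp [PySem.List.insertBy, h y (by simp)]

-- one stable insertion lands at the end of its score block
lemma insertBy_flatMap (ss : List Int) (x : String × Int)
    (items : List (String × Int))
    (hss : ss.Pairwise (fun a b => b < a)) (hx : x.2 ∈ ss) :
    PySem.List.insertBy (fun a b => decide (b.2 < a.2)) x
        (ss.flatMap (fun s => items.filter (fun kv => kv.2 == s)))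
      = ss.flatMap (fun s => (items ++ [x]).filter (fun kv => kv.2 == s)) := by
  induction ss with
  | nil => cases hx
  | cons s ss ih =>
      rw [List.pairwise_cons] at hss
      obtain ⟨hlt, hss'⟩ := hss
      simp only [List.flatMap_cons]
      by_cases hxs : x.2 = s
      · have hblock : ∀ y ∈ items.filter (fun kv => kv.2 == s),
            (fun a b : String × Int => decide (b.2 < a.2)) x y = false := by
          intro y hy
          have : y.2 = s := by simpa using (List.of_mem_filter hy)
          simp [this, hxs]
        rw [insertBy_skip_block _ _ _ _ hblock]
        have hrest : ∀ y ∈ ss.flatMap (fun s => items.filter (fun kv => kv.2 == s)),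
            (fun a b : String × Int => decide (b.2 < a.2)) x y = true := by
          intro y hy
          rw [List.mem_flatMap] at hy
          obtain ⟨t, ht, hyf⟩ := hy
          have hyt : y.2 = t := by simpa using (List.of_mem_filter hyf)
          have : t < s := hlt t ht
          simp [hyt, hxs]
          omega
        rw [insertBy_front _ _ _ hrest]
        have h1 : (items ++ [x]).filter (fun kv => kv.2 == s)
            = items.filter (fun kv => kv.2 == s) ++ [x] := by
          simp [List.filter_append, hxs]
        have h2 : ss.flatMap (fun s => (items ++ [x]).filter (fun kv => kv.2 == s))
            = ss.flatMap (fun s => items.filter (fun kv => kv.2 == s)) := by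
          apply List.flatMap_congr
          intro t ht
          have : t < s := hlt t ht
          have : x.2 ≠ t := by omega
          simp [List.filter_append, this]
        rw [h1, h2]
        simp
      · have hxss : x.2 ∈ ss := by
          rcases List.mem_cons.mp hx with hh | hh
          · exact absurd hh hxs
          · exact hh
        have hblock : ∀ y ∈ items.filter (fun kv => kv.2 == s),
            (fun a b : String × Int => decide (b.2 < a.2)) x y = false := by
          intro y hy
          have hys : y.2 = s := by simpa using (List.of_mem_filter hy)
          have : x.2 < s := hlt _ hxss
          simp [hys]
          omega
        rw [insertBy_skip_block _ _ _ _ hblock, ih hss' hxss]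
        have : (items ++ [x]).filter (fun kv => kv.2 == s)
            = items.filter (fun kv => kv.2 == s) := by
          simp [List.filter_append, hxs]
        rw [this]

-- the whole stable reverse sort is the concatenation of the score blocks
lemma sorted_rev_eq_flatMap (items : List (String × Int)) (ss : List Int)
    (hss : ss.Pairwise (fun a b => b < a))
    (hcov : ∀ kv ∈ items, kv.2 ∈ ss) :
    PySem.List.sorted items (fun kv => kv.2) true
      = ss.flatMap (fun s => items.filter (fun kv => kv.2 == s)) := by
  rw [PySem.List.sorted_rev_eq_foldl_insertBy]
  induction items using List.reverseRecOn with
  | nil => simp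
  | append_singleton l x ih =>
      rw [List.foldl_append]
      simp only [List.foldl_cons, List.foldl_nil]
      rw [ih (fun kv hkv => hcov kv (by simp [hkv]))]
      exact insertBy_flatMap ss x l hss (hcov x (by simp))

-- ===== VERDICT (by name: the statement is the Claim_ definition above) =====
theorem identify_key_metrics_spec : Claim_equal_identify_key_metrics := by
  intro all_metrics _
  unfold Spec_identify_key_metrics identify_key_metrics identify_key_metrics_alt
  rw [pvScores_eq]
  set d : PySem.Dict String Int := all_metrics.foldl (fun d rm =>
      ((PySem.Dict.mk rm.2).getD "metric_names" []).foldl (fun d metric_name =>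
        if pvKeyPatternsB.any (fun p => PySem.Str.isIn p (PySem.Str.lower metric_name)) then
          d.insert metric_name (d.getD metric_name 0 + 1)
        else d) d)
      PySem.Dict.empty with hd
  set ss := PySem.List.sorted (PySem.Set.ofList d.values) (fun s => s) true with hss_def
  have hnd : ss.Nodup := by
    rw [(PySem.List.sorted_perm (PySem.Set.ofList d.values) (fun s => s) true).nodup_iff]
    exact PySem.Set.nodup_ofList _
  have hpw : ss.Pairwise (fun a b => b < a) := by
    have h1 : ss.Pairwise (fun a b : Int => b ≤ a) :=
      PySem.List.sorted_pairwise_rev _ _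
    have h2 : ss.Pairwise (fun a b : Int => a ≠ b) := hnd
    exact (h1.and h2).imp (fun h => lt_of_le_of_ne h.1 (fun e => h.2 e.symm))
  have hcov : ∀ kv ∈ d.items, kv.2 ∈ ss := by
    intro kv hkv
    rw [hss_def, PySem.List.mem_sorted, PySem.Set.mem_ofList]
    exact List.mem_map_of_mem hkv
  dsimp only
  rw [sorted_rev_eq_flatMap d.items ss hpw hcov]
  rw [PySem.List.foldl_append_eq_flatMap]
  rw [PySem.List.slice_to _ (by norm_num), PySem.List.slice_to _ (by norm_num)]
  rw [List.map_take, List.map_flatMap]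
  simp [← hss_def]
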